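-- pv_equiv track=rewrite | github.com/pranavvyas94/Cuttlefish-Research | Code from repos/squid-tracking-master/squid-tracking-master/software/control/optotune_lens.py | crc_16_update
-- ===== SOURCE A (Python) =====
-- def crc_16_update(crc, a):
--
-- 	crc ^= a
--
-- 	for ii in range(8):
-- 		if (crc & 1):
-- 			crc = (crc >> 1) ^ 0xA001
-- 		else:
-- 			crc = (crc >> 1)
--
-- 	return crc
-- ===== SOURCE B (Python) =====
-- CRC_TABLE = [
--     0, 49345, 49537, 320, 49921, 960, 640, 49729,
--     50689, 1728, 1920, 51009, 1280, 50625, 50305, 1088,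
--     52225, 3264, 3456, 52545, 3840, 53185, 52865, 3648,
--     2560, 51905, 52097, 2880, 51457, 2496, 2176, 51265,
--     55297, 6336, 6528, 55617, 6912, 56257, 55937, 6720,
--     7680, 57025, 57217, 8000, 56577, 7616, 7296, 56385,
--     5120, 54465, 54657, 5440, 55041, 6080, 5760, 54849,
--     53761, 4800, 4992, 54081, 4352, 53697, 53377, 4160,
--     61441, 12480, 12672, 61761, 13056, 62401, 62081, 12864,
--     13824, 63169, 63361, 14144, 62721, 13760, 13440, 62529,
--     15360, 64705, 64897, 15680, 65281, 16320, 16000, 65089,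
--     64001, 15040, 15232, 64321, 14592, 63937, 63617, 14400,
--     10240, 59585, 59777, 10560, 60161, 11200, 10880, 59969,
--     60929, 11968, 12160, 61249, 11520, 60865, 60545, 11328,
--     58369, 9408, 9600, 58689, 9984, 59329, 59009, 9792,
--     8704, 58049, 58241, 9024, 57601, 8640, 8320, 57409,
--     40961, 24768, 24960, 41281, 25344, 41921, 41601, 25152,
--     26112, 42689, 42881, 26432, 42241, 26048, 25728, 42049,
--     27648, 44225, 44417, 27968, 44801, 28608, 28288, 44609,
--     43521, 27328, 27520, 43841, 26880, 43457, 43137, 26688,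
--     30720, 47297, 47489, 31040, 47873, 31680, 31360, 47681,
--     48641, 32448, 32640, 48961, 32000, 48577, 48257, 31808,
--     46081, 29888, 30080, 46401, 30464, 47041, 46721, 30272,
--     29184, 45761, 45953, 29504, 45313, 29120, 28800, 45121,
--     20480, 37057, 37249, 20800, 37633, 21440, 21120, 37441,
--     38401, 22208, 22400, 38721, 21760, 38337, 38017, 21568,
--     39937, 23744, 23936, 40257, 24320, 40897, 40577, 24128,
--     23040, 39617, 39809, 23360, 39169, 22976, 22656, 38977,
--     34817, 18624, 18816, 35137, 19200, 35777, 35457, 19008,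
--     19968, 36545, 36737, 20288, 36097, 19904, 19584, 35905,
--     17408, 33985, 34177, 17728, 34561, 18368, 18048, 34369,
--     33281, 17088, 17280, 33601, 16640, 33217, 32897, 16448,
-- ]
--
--
-- def crc_16_update(crc, a):
--     x = crc ^ a
--     return (x >> 8) ^ CRC_TABLE[x & 0xFF]
-- ===== Notes on version B (the rewrite author's own statement) =====
-- stated objective: alternative
-- what changed: Replaces A's 8-iteration per-bit polynomial reduction loop by a single lookup in a precomputed 256-entry CRC-16 (poly 0xA001) table: x = crc ^ a; (x >> 8) ^ CRC_TABLE[x & 0xFF].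
import Mathlib
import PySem

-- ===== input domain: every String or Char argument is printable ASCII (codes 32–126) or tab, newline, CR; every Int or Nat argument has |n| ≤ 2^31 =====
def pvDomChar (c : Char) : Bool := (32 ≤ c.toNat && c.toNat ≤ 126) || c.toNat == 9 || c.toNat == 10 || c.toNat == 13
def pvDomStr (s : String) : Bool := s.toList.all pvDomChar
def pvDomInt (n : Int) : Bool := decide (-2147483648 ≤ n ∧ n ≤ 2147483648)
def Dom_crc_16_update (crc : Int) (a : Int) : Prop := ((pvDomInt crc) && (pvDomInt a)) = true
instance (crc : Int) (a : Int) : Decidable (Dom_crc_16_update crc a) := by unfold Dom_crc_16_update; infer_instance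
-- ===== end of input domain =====

-- B replaces A's 8-step per-bit loop by a single lookup in the precomputed 256-entry
-- CRC-16 (poly 0xA001) table: (x >> 8) ^ CRC_TABLE[x & 0xFF] where x = crc ^ a.

-- ===== PORT A =====
def crc_16_update (crc : Int) (a : Int) : Int :=
  (PySem.List.pyRange 0 8 1).foldl
    (fun c _ii =>
      if PySem.Int.band c 1 ≠ 0 then PySem.Int.bxor (c >>> (1:Nat)) 0xA001
      else c >>> (1:Nat))
    (PySem.Int.bxor crc a)

-- ===== PORT B =====
def CRC_TABLE : List Int := [0, 49345, 49537, 320, 49921, 960, 640, 49729, 50689, 1728, 1920, 51009, 1280, 50625, 50305, 1088, 52225, 3264, 3456, 52545, 3840, 53185, 52865, 3648, 2560, 51905, 52097, 2880, 51457, 2496, 2176, 51265, 55297, 6336, 6528, 55617, 6912, 56257, 55937, 6720, 7680, 57025, 57217, 8000, 56577, 7616, 7296, 56385, 5120, 54465, 54657, 5440, 55041, 6080, 5760, 54849, 53761, 4800, 4992, 54081, 4352, 53697, 53377, 4160, 61441, 12480, 12672, 61761, 13056, 62401, 62081, 12864, 13824, 63169, 63361, 14144, 62721, 13760, 13440, 62529,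 15360, 64705, 64897, 15680, 65281, 16320, 16000, 65089, 64001, 15040, 15232, 64321, 14592, 63937, 63617, 14400, 10240, 59585, 59777, 10560, 60161, 11200, 10880, 59969, 60929, 11968, 12160, 61249, 11520, 60865, 60545, 11328, 58369, 9408, 9600, 58689, 9984, 59329, 59009, 9792, 8704, 58049, 58241, 9024, 57601, 8640, 8320, 57409, 40961, 24768, 24960, 41281, 25344, 41921, 41601, 25152, 26112, 42689, 42881, 26432, 42241, 26048, 25728, 42049, 27648, 44225, 44417, 27968, 44801, 28608, 28288, 44609, 43521, 27328, 27520, 43841, 26880, 43457, 43137, 26688, 30720, 47297, 47489, 31040, 47873, 31680, 31360, 47681, 48641, 32448, 32640, 48961, 32000, 48577, 48257, 31808, 46081, 29888, 30080, 46401, 30464, 47041, 46721, 30272, 29184, 45761, 45953, 29504, 45313, 29120, 28800, 45121, 20480, 37057, 37249, 20800, 37633, 21440, 21120, 37441, 38401, 22208, 22400, 38721, 21760, 38337, 38017, 21568, 39937, 23744, 23936, 40257, 24320, 40897, 40577, 24128, 23040, 39617, 39809, 23360, 39169, 22976, 22656, 38977, 34817, 18624, 18816, 35137, 19200, 35777,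 35457, 19008, 19968, 36545, 36737, 20288, 36097, 19904, 19584, 35905, 17408, 33985, 34177, 17728, 34561, 18368, 18048, 34369, 33281, 17088, 17280, 33601, 16640, 33217, 32897, 16448]

def crc_16_update_alt (crc : Int) (a : Int) : Int :=
  let x := PySem.Int.bxor crc a
  PySem.Int.bxor (x >>> (8:Nat)) ((PySem.List.pyGet? CRC_TABLE (PySem.Int.band x 255)).getD 0)

-- ===== PRECONDITION & SPEC =====
def Spec_crc_16_update (crc : Int) (a : Int) (out : Int) : Prop := out = crc_16_update_alt crc a
instance (crc : Int) (a : Int) (out : Int) : Decidable (Spec_crc_16_update crc a out) := by unfold Spec_crc_16_update; infer_instance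

-- ===== CLAIM (what is proved, stated in full; the proofs are below) =====
def Claim_equal_crc_16_update : Prop := ∀ (crc : Int) (a : Int), Dom_crc_16_update crc a → Spec_crc_16_update crc a (crc_16_update crc a)

-- ===== LEMMAS AND PROOFS =====

-- one body iteration of A's loop
def pvStep (c : Int) : Int :=
  if PySem.Int.band c 1 ≠ 0 then PySem.Int.bxor (c >>> (1:Nat)) 0xA001
  else c >>> (1:Nat)

theorem pv_bxor_negSucc_negSucc (m n : Nat) :
    PySem.Int.bxor (Int.negSucc m) (Int.negSucc n) = ((m ^^^ n : Nat) : Int) := by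
  unfold PySem.Int.bxor
  rw [if_neg (by omega), if_neg (by omega)]
  have h1 : (-(Int.negSucc m) - 1).toNat = m := by omega
  have h2 : (-(Int.negSucc n) - 1).toNat = n := by omega
  rw [h1, h2]

theorem pv_bxor_ofNat_negSucc (m n : Nat) :
    PySem.Int.bxor ((m : Nat) : Int) (Int.negSucc n) = Int.negSucc (m ^^^ n) := by
  unfold PySem.Int.bxor
  rw [if_pos (by omega), if_neg (by omega)]
  have h1 : ((m : Int)).toNat = m := by omega
  have h2 : (-(Int.negSucc n) - 1).toNat = n := by omega
  rw [h1, h2]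
  omega

theorem pv_bxor_negSucc_ofNat (m n : Nat) :
    PySem.Int.bxor (Int.negSucc m) ((n : Nat) : Int) = Int.negSucc (m ^^^ n) := by
  rw [PySem.Int.bxor_comm, pv_bxor_ofNat_negSucc, Nat.xor_comm]

theorem pv_sr1 (x : Int) : x >>> (1:Nat) = x / 2 := by
  rcases x with m|m
  · rw [show ((Int.ofNat m) >>> (1:Nat) : Int) = Int.ofNat (m >>> 1) from rfl]
    simp [Nat.shiftRight_eq_div_pow, Int.ofNat_eq_natCast]
  · rw [show ((Int.negSucc m) >>> (1:Nat) : Int) = Int.negSucc (m >>> 1) from rfl]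
    simp [Nat.shiftRight_eq_div_pow, Int.negSucc_eq]
    omega

theorem pv_sr8 (x : Int) : x >>> (8:Nat) = x / 256 := by
  rcases x with m|m
  · rw [show ((Int.ofNat m) >>> (8:Nat) : Int) = Int.ofNat (m >>> 8) from rfl]
    simp [Nat.shiftRight_eq_div_pow, Int.ofNat_eq_natCast]
    try omega
  · rw [show ((Int.negSucc m) >>> (8:Nat) : Int) = Int.negSucc (m >>> 8) from rfl]
    simp [Nat.shiftRight_eq_div_pow, Int.negSucc_eq]
    omega

theorem pv_band_one (c : Int) : PySem.Int.band c 1 = c % 2 := by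
  rw [PySem.Int.band_one]
  simp [PySem.Int.mod, Int.fmod_eq_emod]

theorem pv_band_255 (x : Int) : PySem.Int.band x 255 = x % 256 := by
  rcases x with m|m
  · rw [show ((Int.ofNat m) : Int) = ((m : Nat) : Int) from rfl,
      show ((255:Int)) = ((255:Nat) : Int) from rfl, PySem.Int.band_natCast]
    rw [show (255:Nat) = 2^8 - 1 from rfl, Nat.and_two_pow_sub_one_eq_mod]
    omega
  · unfold PySem.Int.band
    rw [if_neg (by omega), if_pos (by omega)]
    have h1 : ((255:Int)).toNat = 255 := rfl
    have h2 : (-(Int.negSucc m) - 1).toNat = m := by omega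
    rw [h1, h2, Nat.and_comm, show (255:Nat) = 2^8 - 1 from rfl,
      Nat.and_two_pow_sub_one_eq_mod]
    have : m % 256 < 256 := Nat.mod_lt _ (by omega)
    omega

theorem pv_bxor_sr1 (a b : Int) :
    (PySem.Int.bxor a b) >>> (1:Nat) = PySem.Int.bxor (a >>> (1:Nat)) (b >>> (1:Nat)) := by
  have hN : ∀ k : Nat, ((k:Int) >>> (1:Nat)) = ((k >>> 1 : Nat) : Int) := fun _ => rfl
  have hS : ∀ k : Nat, ((Int.negSucc k) >>> (1:Nat)) = Int.negSucc (k >>> 1) := fun _ => rfl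
  rcases a with m|m <;> rcases b with n|n <;>
    simp only [Int.ofNat_eq_natCast, PySem.Int.bxor_natCast, pv_bxor_ofNat_negSucc,
      pv_bxor_negSucc_ofNat, pv_bxor_negSucc_negSucc, hN, hS, Nat.shiftRight_xor_distrib]

theorem pv_bxor_half (a b : Int) :
    (PySem.Int.bxor a b) / 2 = PySem.Int.bxor (a / 2) (b / 2) := by
  rw [← pv_sr1, ← pv_sr1, ← pv_sr1, pv_bxor_sr1]

theorem pv_nat_xor_mod_two (x y : Nat) : (x ^^^ y) % 2 = (x % 2 + y % 2) % 2 := by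
  rw [← Nat.and_one_is_mod (x ^^^ y), Nat.and_xor_distrib_right,
    Nat.and_one_is_mod, Nat.and_one_is_mod]
  rcases Nat.mod_two_eq_zero_or_one x with h | h <;>
    rcases Nat.mod_two_eq_zero_or_one y with h' | h' <;> rw [h, h'] <;> decide

theorem pv_bxor_parity (a b : Int) :
    (PySem.Int.bxor a b) % 2 = (a % 2 + b % 2) % 2 := by
  have h := pv_nat_xor_mod_two
  rcases a with m|m <;> rcases b with n|n <;>
    simp only [Int.ofNat_eq_natCast, PySem.Int.bxor_natCast, pv_bxor_ofNat_negSucc,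
      pv_bxor_negSucc_ofNat, pv_bxor_negSucc_negSucc]
  all_goals try simp only [Int.negSucc_eq]
  all_goals (have hx := h m n; omega)

theorem pv_bxor_assoc (a b c : Int) :
    PySem.Int.bxor (PySem.Int.bxor a b) c = PySem.Int.bxor a (PySem.Int.bxor b c) := by
  rcases a with m|m <;> rcases b with n|n <;> rcases c with p|p <;>
    simp only [Int.ofNat_eq_natCast, PySem.Int.bxor_natCast, pv_bxor_ofNat_negSucc,
      pv_bxor_negSucc_ofNat, pv_bxor_negSucc_negSucc, Nat.xor_assoc]

theorem pv_bxor_right_comm (a b c : Int) :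
    PySem.Int.bxor (PySem.Int.bxor a b) c = PySem.Int.bxor (PySem.Int.bxor a c) b := by
  rw [pv_bxor_assoc, pv_bxor_assoc, PySem.Int.bxor_comm b c]

theorem pv_step_even (r y : Int) (hy : y % 2 = 0) :
    pvStep (PySem.Int.bxor r y) = PySem.Int.bxor (pvStep r) (y / 2) := by
  have hpar : (PySem.Int.bxor r y) % 2 = r % 2 := by
    rw [pv_bxor_parity, hy]; omega
  unfold pvStep
  rw [pv_band_one, pv_band_one, hpar, pv_sr1, pv_sr1, pv_bxor_half]
  by_cases h : r % 2 = 0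
  · rw [if_neg (by omega), if_neg (by omega)]
  · rw [if_pos (by omega), if_pos (by omega), pv_bxor_right_comm]

theorem pv_iter (n : Nat) (r q : Int) :
    pvStep^[n] (PySem.Int.bxor r (q * 2^n)) = PySem.Int.bxor (pvStep^[n] r) q := by
  induction n generalizing r q with
  | zero => simp
  | succ n ih =>
    have hdvd : (2:Int) ∣ q * 2^(n+1) := ⟨q * 2^n, by ring⟩
    have hy : (q * 2^(n+1)) % 2 = 0 := by omega
    have hhalf : (q * 2^(n+1)) / 2 = q * 2^n := by
      rw [show q * 2^(n+1) = (q * 2^n) * 2 by ring, Int.mul_ediv_cancel _ (by norm_num)]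
    rw [Function.iterate_succ_apply, Function.iterate_succ_apply,
      pv_step_even r _ hy, hhalf, ih]

theorem pv_bxor_addlow (n : Nat) (q s : Int) (h0 : 0 ≤ s) (h1 : s < 2^n) :
    PySem.Int.bxor (q * 2^n) s = q * 2^n + s := by
  induction n generalizing q s with
  | zero =>
    have : s = 0 := by omega
    simp [this]
  | succ n ih =>
    have hdvd : (2:Int) ∣ q * 2^(n+1) := ⟨q * 2^n, by ring⟩
    have hhalf : (q * 2^(n+1)) / 2 = q * 2^n := by
      rw [show q * 2^(n+1) = (q * 2^n) * 2 by ring, Int.mul_ediv_cancel _ (by norm_num)]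
    have hs2 : s / 2 < 2^n := by omega
    have hL2 : (PySem.Int.bxor (q * 2^(n+1)) s) / 2 = q * 2^n + s / 2 := by
      rw [pv_bxor_half, hhalf, ih _ _ (by omega) hs2]
    have hLp : (PySem.Int.bxor (q * 2^(n+1)) s) % 2 = s % 2 := by
      rw [pv_bxor_parity]; omega
    omega

set_option maxRecDepth 100000 in
theorem pv_table (s : Int) (h0 : 0 ≤ s) (h1 : s < 256) :
    (PySem.List.pyGet? CRC_TABLE s).getD 0 = pvStep^[8] s := by
  lift s to Nat using h0 with m
  rw [PySem.List.pyGet?_natCast]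
  have hm : m < 256 := by omega
  have hall : (List.range 256).all
      (fun k => (CRC_TABLE[k]?.getD 0) == pvStep^[8] ((k : Nat) : Int)) = true := by decide
  have := List.all_eq_true.mp hall m (List.mem_range.mpr hm)
  exact beq_iff_eq.mp this

theorem pv_portA (crc a : Int) :
    crc_16_update crc a = pvStep^[8] (PySem.Int.bxor crc a) := by
  rfl

theorem crc_16_update_eq_alt (crc a : Int) :
    crc_16_update crc a = crc_16_update_alt crc a := by
  rw [pv_portA]
  set x := PySem.Int.bxor crc a with hx
  have hq0 : 0 ≤ x % 256 := Int.emod_nonneg _ (by norm_num)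
  have hq1 : x % 256 < 256 := Int.emod_lt_of_pos _ (by norm_num)
  have hdecomp : x = PySem.Int.bxor (x % 256) (x / 256 * 2^8) := by
    rw [PySem.Int.bxor_comm, pv_bxor_addlow 8 _ _ hq0 (by omega)]
    omega
  calc pvStep^[8] x
      = pvStep^[8] (PySem.Int.bxor (x % 256) (x / 256 * 2^8)) := by rw [← hdecomp]
    _ = PySem.Int.bxor (pvStep^[8] (x % 256)) (x / 256) := pv_iter 8 _ _
    _ = crc_16_update_alt crc a := by
        show _ = PySem.Int.bxor (x >>> (8:Nat)) ((PySem.List.pyGet? CRC_TABLE (PySem.Int.band x 255)).getD 0)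
        rw [pv_sr8, pv_band_255, pv_table _ hq0 hq1, PySem.Int.bxor_comm]

-- ===== VERDICT (by name: the statement is the Claim_ definition above) =====
theorem crc_16_update_spec : Claim_equal_crc_16_update := by
  intro crc a _
  unfold Spec_crc_16_update
  exact crc_16_update_eq_alt crc a
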